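-- pv_equiv track=rewrite | github.com/greged93/minhash-cairo | tests/utils.py | mapping_instructions
-- ===== SOURCE A (Python) =====
-- from collections import defaultdict
--
-- def mapping_instructions(instructions=[], local_offset=128):
--     offset = defaultdict(lambda: 0)
--     new = []
--     for i in instructions:
--         o = offset[i]
--         new.append(o + (i + 1) * local_offset)
--         offset[i] += 1
--     return new
-- ===== SOURCE B (Python) =====
-- from collections import defaultdict
--
-- def mapping_instructions(instructions=[], local_offset=128):
--     # Two-stage grouped computation: first index every value's positions,
--     # then fill a preallocated output per group, rank = occurrence index.
--     positions = defaultdict(list)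
--     for idx, v in enumerate(instructions):
--         positions[v].append(idx)
--     new = [0] * len(instructions)
--     for v, idxs in positions.items():
--         for rank, idx in enumerate(idxs):
--             new[idx] = rank + (v + 1) * local_offset
--     return new
-- ===== Notes on version B (the rewrite author's own statement) =====
-- stated objective: alternative
-- what changed: Replaces A's single pass carrying a per-value counter dict with a two-stage grouped computation: first build an index mapping each value to its list of positions, then fill a preallocated output where each position gets its rank in its value's group plus (value+1)*local_offset.
import Mathlib
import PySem

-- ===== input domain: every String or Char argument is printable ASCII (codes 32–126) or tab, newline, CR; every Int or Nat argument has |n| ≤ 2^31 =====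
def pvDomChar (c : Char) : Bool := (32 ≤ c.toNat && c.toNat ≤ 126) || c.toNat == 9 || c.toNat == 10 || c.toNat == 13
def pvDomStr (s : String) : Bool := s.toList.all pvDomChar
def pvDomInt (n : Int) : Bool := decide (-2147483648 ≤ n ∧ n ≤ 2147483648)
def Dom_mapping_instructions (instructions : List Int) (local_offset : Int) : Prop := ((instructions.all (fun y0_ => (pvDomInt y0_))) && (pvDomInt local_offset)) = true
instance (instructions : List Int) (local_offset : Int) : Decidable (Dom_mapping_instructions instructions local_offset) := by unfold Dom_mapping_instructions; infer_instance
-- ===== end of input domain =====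

-- B replaces A's single counter-carrying pass with a two-stage grouped computation:
-- first an index of each value's positions, then a preallocated output filled per group by rank.

-- ===== PORT A =====
-- defaultdict read 'offset[i]' then 'offset[i] += 1' nets to getD 0 and insert of o+1
def mapping_instructions (instructions : List Int) (local_offset : Int) : List Int :=
  (instructions.foldl
    (fun (st : PySem.Dict Int Int × List Int) i =>
      let o := st.1.getD i 0
      (st.1.insert i (o + 1), st.2 ++ [o + (i + 1) * local_offset]))
    (PySem.Dict.empty, [])).2

-- ===== PORT B =====
-- 'positions[v].append(idx)' on a defaultdict(list) is modify with default [];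
-- 'new[idx] = …' is pySetD (every written index is in range)
def mapping_instructions_alt (instructions : List Int) (local_offset : Int) : List Int :=
  let positions : PySem.Dict Int (List Int) :=
    (PySem.List.enumerate instructions).foldl
      (fun d kv => d.modify kv.2 [] (· ++ [kv.1])) PySem.Dict.empty
  positions.items.foldl
    (fun new p =>
      (PySem.List.enumerate p.2).foldl
        (fun new rk => PySem.List.pySetD new rk.2 (rk.1 + (p.1 + 1) * local_offset)) new)
    (List.replicate instructions.length 0)

-- ===== PRECONDITION & SPEC =====
def Spec_mapping_instructions (instructions : List Int) (local_offset : Int) (out : List Int) : Prop := out = mapping_instructions_alt instructions local_offset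
instance (instructions : List Int) (local_offset : Int) (out : List Int) : Decidable (Spec_mapping_instructions instructions local_offset out) := by unfold Spec_mapping_instructions; infer_instance

-- ===== CLAIM (what is proved, stated in full; the proofs are below) =====
def Claim_equal_mapping_instructions : Prop := ∀ (instructions : List Int) (local_offset : Int), Dom_mapping_instructions instructions local_offset → Spec_mapping_instructions instructions local_offset (mapping_instructions instructions local_offset)

-- ===== LEMMAS AND PROOFS =====

def occS (l : List Int) (s : Int) (v : Int) : List Int :=
  ((PySem.List.enumerate l s).filter (fun kv => kv.2 == v)).map (·.1)

theorem occS_cons (x : Int) (l : List Int) (s v : Int) :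
    occS (x :: l) s v = (if x = v then [s] else []) ++ occS l (s+1) v := by
  simp [occS, PySem.List.enumerate_cons, List.filter_cons]
  split_ifs <;> simp_all

theorem occS_mem (l : List Int) (v : Int) (j : Nat) :
    ((j : Int) ∈ occS l 0 v) ↔ ∃ _ : j < l.length, l.getD j 0 = v := by
  simp [occS, List.mem_map, List.mem_filter, PySem.List.mem_enumerate_iff]

  constructor
  · rintro ⟨h, hv⟩; exact ⟨h, by simp [List.getElem?_eq_getElem h, hv]⟩
  · rintro ⟨h, hv⟩; exact ⟨h, by simpa [List.getElem?_eq_getElem h] using hv⟩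

theorem occS_getElem (l : List Int) (v : Int) (sn r : Nat)
    (hr : r < (occS l (sn : Int) v).length) :
    ∃ kn : Nat, (occS l (sn : Int) v).getD r 0 = ((sn + kn : Nat) : Int) ∧
      ∃ _ : kn < l.length, l.getD kn 0 = v ∧ (l.take kn).count v = r := by
  induction l generalizing sn r with
  | nil => simp [occS, PySem.List.enumerate_nil] at hr
  | cons x l ih =>
    rw [occS_cons] at hr ⊢
    by_cases hx : x = v
    · simp only [hx, reduceIte] at hr ⊢
      cases r with
      | zero =>
        refine ⟨0, by simp [List.getD], by simp, by simp, by simp⟩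
      | succ r =>
        have hr' : r < (occS l ((sn : Int) + 1) v).length := by simpa using hr
        have hcast : ((sn : Int) + 1) = ((sn + 1 : Nat) : Int) := by push_cast; ring
        rw [hcast] at hr'
        obtain ⟨kn, hget, hlt, hval, hcnt⟩ := ih (sn + 1) r hr'
        refine ⟨kn + 1, ?_, by simpa using Nat.succ_lt_succ hlt, by simpa using hval, ?_⟩
        · rw [show ([(sn:Int)] ++ occS l ((sn:Int)+1) v).getD (r+1) 0
              = (occS l ((sn:Int)+1) v).getD r 0 by simp [List.getD]]
          rw [hcast, hget]; push_cast; ring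
        · simp [List.take_succ_cons, hcnt]
    · simp only [hx, reduceIte, List.nil_append] at hr ⊢
      have hcast : ((sn : Int) + 1) = ((sn + 1 : Nat) : Int) := by push_cast; ring
      rw [hcast] at hr ⊢
      obtain ⟨kn, hget, hlt, hval, hcnt⟩ := ih (sn + 1) r hr
      refine ⟨kn + 1, ?_, by simpa using Nat.succ_lt_succ hlt, by simpa using hval, ?_⟩
      · rw [hget]; push_cast; ring
      · simp [List.take_succ_cons, hx, hcnt]

def tval (l : List Int) (off : Int) (j : Nat) : Int :=
  ((l.take j).count (l.getD j 0) : Int) + (l.getD j 0 + 1) * off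

theorem fillInner (off v : Int) (l : List Int) (idxs : List Int) (s : Nat) (new : List Int)
    (hlen : new.length = l.length)
    (hspec : ∀ r, r < idxs.length → ∃ kn : Nat, idxs.getD r 0 = (kn : Int) ∧
      ∃ _ : kn < l.length, l.getD kn 0 = v ∧ (l.take kn).count v = s + r) :
    ((PySem.List.enumerate idxs (s : Int)).foldl
        (fun nw rk => PySem.List.pySetD nw rk.2 (rk.1 + (v + 1) * off)) new).length = l.length ∧
    ∀ j : Nat, j < l.length →
      ((PySem.List.enumerate idxs (s : Int)).foldl
        (fun nw rk => PySem.List.pySetD nw rk.2 (rk.1 + (v + 1) * off)) new).getD j 0 =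
      if (j : Int) ∈ idxs then tval l off j else new.getD j 0 := by
  induction idxs generalizing s new with
  | nil => simp [PySem.List.enumerate_nil, hlen]
  | cons k rest ih =>
    obtain ⟨kn, hk, hklt, hkval, hkcnt⟩ := hspec 0 (by simp)
    simp only [List.getD_cons_zero] at hk
    rw [PySem.List.enumerate_cons]
    simp only [List.foldl_cons]
    have hset : PySem.List.pySetD new k ((s : Int) + (v + 1) * off)
        = new.set kn ((s : Int) + (v + 1) * off) := by
      rw [hk, PySem.List.pySetD_natCast]
    rw [hset]
    have hcast : ((s : Int) + 1) = ((s + 1 : Nat) : Int) := by push_cast; ring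
    rw [hcast]
    have hspec' : ∀ r, r < rest.length → ∃ kn : Nat, rest.getD r 0 = (kn : Int) ∧
        ∃ _ : kn < l.length, l.getD kn 0 = v ∧ (l.take kn).count v = (s + 1) + r := by
      intro r hr
      obtain ⟨kn', h1, h2, h3, h4⟩ := hspec (r + 1) (by simpa using hr)
      exact ⟨kn', by simpa [List.getD] using h1, h2, h3, by omega⟩
    obtain ⟨ihlen, ihptw⟩ := ih (s + 1) (new.set kn ((s : Int) + (v + 1) * off))
      (by simpa using hlen) hspec'
    refine ⟨ihlen, ?_⟩
    intro j hj
    rw [ihptw j hj]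
    by_cases hjr : (j : Int) ∈ rest
    · simp [hjr]
    · by_cases hjk : (j : Int) = k
      · have hjkn : j = kn := by
          have : (j : Int) = (kn : Int) := by rw [hjk, hk]
          exact_mod_cast this
        subst hjkn
        have htv : tval l off j = (s : Int) + (v + 1) * off := by
          unfold tval; rw [hkval, hkcnt]; push_cast; ring
        rw [if_neg hjr, if_pos (List.mem_cons.mpr (Or.inl hjk))]
        rw [List.getD_eq_getElem?_getD, List.getElem?_set_self (by omega),
          Option.getD_some, htv]
      · have hjkn : j ≠ kn := by
          intro h; apply hjk; rw [h, hk]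
        rw [if_neg hjr, if_neg (by simp [hjk, hjr])]
        rw [List.getD_eq_getElem?_getD, List.getElem?_set_ne (by omega)]
        simp [List.getD_eq_getElem?_getD]

theorem fillOuter (off : Int) (l : List Int) (K : List Int) (new : List Int)
    (hlen : new.length = l.length) :
    (K.foldl (fun nw v =>
        (PySem.List.enumerate (occS l 0 v)).foldl
          (fun nw rk => PySem.List.pySetD nw rk.2 (rk.1 + (v + 1) * off)) nw) new).length = l.length ∧
    ∀ j : Nat, j < l.length →
      (K.foldl (fun nw v =>
        (PySem.List.enumerate (occS l 0 v)).foldl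
          (fun nw rk => PySem.List.pySetD nw rk.2 (rk.1 + (v + 1) * off)) nw) new).getD j 0 =
      if l.getD j 0 ∈ K then tval l off j else new.getD j 0 := by
  induction K generalizing new with
  | nil => simp [hlen]
  | cons v K' ih =>
    simp only [List.foldl_cons]
    have hspec0 : ∀ r, r < (occS l 0 v).length → ∃ kn : Nat, (occS l 0 v).getD r 0 = (kn : Int) ∧
        ∃ _ : kn < l.length, l.getD kn 0 = v ∧ (l.take kn).count v = 0 + r := by
      intro r hr
      obtain ⟨kn, h1, h2, h3, h4⟩ := occS_getElem l v 0 r (by simpa using hr)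
      exact ⟨kn, by simpa using h1, h2, h3, by omega⟩
    have henum : PySem.List.enumerate (occS l 0 v) = PySem.List.enumerate (occS l 0 v) ((0 : Nat) : Int) := by
      norm_num [PySem.List.enumerate]
    rw [henum]
    obtain ⟨ilen, iptw⟩ := fillInner off v l (occS l 0 v) 0 new hlen
      (by simpa using hspec0)
    obtain ⟨olen, optw⟩ := ih _ ilen
    refine ⟨olen, ?_⟩
    intro j hj
    rw [optw j hj, iptw j hj]
    have hocc : ((j : Int) ∈ occS l 0 v) ↔ l.getD j 0 = v := by
      rw [occS_mem]
      exact ⟨fun ⟨_, h⟩ => h, fun h => ⟨hj, h⟩⟩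
    simp only [List.mem_cons]
    by_cases h1 : l.getD j 0 ∈ K'
    · rw [if_pos h1, if_pos (Or.inr h1)]
    · by_cases h2 : l.getD j 0 = v
      · rw [if_neg h1, if_pos (hocc.mpr h2), if_pos (Or.inl h2)]
      · rw [if_neg h1, if_neg (fun hm => h2 (hocc.mp hm)), if_neg (by tauto)]

theorem posGetD (l : List Int) (v : Int) :
    ((PySem.List.enumerate l).foldl
      (fun d kv => d.modify kv.2 [] (· ++ [kv.1])) PySem.Dict.empty).getD v [] = occS l 0 v := by
  have h : (PySem.List.enumerate l).foldl
      (fun d kv => d.modify kv.2 [] (· ++ [kv.1])) (PySem.Dict.empty : PySem.Dict Int (List Int))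
      = ((PySem.List.enumerate l).map (fun kv => (kv.2, kv.1))).foldl
        (fun d p => d.modify p.1 [] (· ++ [p.2])) PySem.Dict.empty := by
    rw [List.foldl_map]
  rw [h, PySem.Dict.getD_foldl_modify_append]
  simp [occS, PySem.Dict.getD_empty, List.filter_map, Function.comp_def, List.map_map]

theorem posKeys (l : List Int) :
    ((PySem.List.enumerate l).foldl
      (fun d kv => d.modify kv.2 [] (· ++ [kv.1])) PySem.Dict.empty).keys = PySem.Set.ofList l := by
  rw [PySem.Dict.keys_foldl_modify_key (l := PySem.List.enumerate l) (key := fun kv : Int × Int => kv.2) (d0 := ([] : List Int)) (f := fun _ kv => fun x => x ++ [kv.1]) (d := PySem.Dict.empty)]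
  simp [PySem.Dict.keys_empty, PySem.List.map_snd_enumerate, PySem.Set.update,
    PySem.Set.ofList_eq_foldl]

theorem posNodup (l : List Int) :
    ((PySem.List.enumerate l).foldl
      (fun d kv => d.modify kv.2 [] (· ++ [kv.1])) PySem.Dict.empty).keys.Nodup := by
  exact PySem.Dict.nodup_keys_foldl_modify_key _ _ _ _ _ PySem.Dict.nodup_keys_empty

def specGo (off : Int) : List Int → List Int → List Int
  | [], _ => []
  | v :: l, pre => ((pre.count v : Int) + (v + 1) * off) :: specGo off l (pre ++ [v])

theorem specGo_length (off : Int) (l pre : List Int) : (specGo off l pre).length = l.length := by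
  induction l generalizing pre with
  | nil => simp [specGo]
  | cons v l ih => simp [specGo, ih]

theorem specGo_getD (off : Int) (l : List Int) (pre : List Int) (k : Nat) (hk : k < l.length) :
    (specGo off l pre).getD k 0 = ((pre ++ l.take k).count (l.getD k 0) : Int) + (l.getD k 0 + 1) * off := by
  induction l generalizing pre k with
  | nil => simp at hk
  | cons v l ih =>
    cases k with
    | zero => simp [specGo]
    | succ k =>
      have hk' : k < l.length := by simpa using hk
      have := ih (pre ++ [v]) k hk'
      simp only [List.getD] at this ⊢
      simp only [specGo, List.getElem?_cons_succ, List.take_succ_cons]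
      rw [this]
      simp [List.append_assoc]

theorem aLoop_eq_specGo (off : Int) (l : List Int) (pre : List Int)
    (d : PySem.Dict Int Int) (acc : List Int)
    (hd : ∀ v, d.getD v 0 = (pre.count v : Int)) :
    (l.foldl
      (fun (st : PySem.Dict Int Int × List Int) i =>
        let o := st.1.getD i 0
        (st.1.insert i (o + 1), st.2 ++ [o + (i + 1) * off]))
      (d, acc)).2 = acc ++ specGo off l pre := by
  induction l generalizing pre d acc with
  | nil => simp [specGo]
  | cons v l ih =>
    simp only [List.foldl_cons, specGo]
    rw [ih (pre ++ [v]) _ (acc ++ [d.getD v 0 + (v + 1) * off])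
        (by
          intro w
          have h := PySem.Dict.getD_foldl_insert_add_one (l := [v]) (d := d) (v := w)
          simp only [List.foldl_cons, List.foldl_nil] at h
          rw [h, hd w]
          simp [List.count_append])]
    simp [hd v]

theorem a_eq (l : List Int) (off : Int) :
    mapping_instructions l off = (List.range l.length).map (tval l off) := by
  unfold mapping_instructions
  rw [aLoop_eq_specGo off l [] PySem.Dict.empty []
      (by intro v; simp [PySem.Dict.getD_empty])]
  simp only [List.nil_append]
  apply List.ext_getElem
  · simp [specGo_length]
  · intro i h1 h2
    have hi : i < l.length := by simpa [specGo_length] using h1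
    have hs := specGo_getD off l [] i hi
    rw [List.getD_eq_getElem _ _ h1] at hs
    simp only [List.nil_append] at hs
    rw [hs]
    simp [tval]

theorem bAlt_eq (l : List Int) (off : Int) :
    mapping_instructions_alt l off = (List.range l.length).map (tval l off) := by
  have hdef : mapping_instructions_alt l off =
      ((PySem.List.enumerate l).foldl
        (fun d kv => d.modify kv.2 [] (· ++ [kv.1])) PySem.Dict.empty).items.foldl
        (fun new p =>
          (PySem.List.enumerate p.2).foldl
            (fun new rk => PySem.List.pySetD new rk.2 (rk.1 + (p.1 + 1) * off)) new)
        (List.replicate l.length 0) := rfl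
  rw [hdef]
  rw [PySem.Dict.items_eq_map_keys _ (posNodup l) ([] : List Int)]
  rw [List.foldl_map]
  simp only [posGetD, posKeys]
  obtain ⟨hlen2, hptw⟩ := fillOuter off l (PySem.Set.ofList l) (List.replicate l.length 0)
    (by simp)
  apply List.ext_getElem
  · simpa using hlen2
  · intro i h1 h2
    have hi : i < l.length := by simpa using h2
    have h := hptw i hi
    rw [List.getD_eq_getElem _ _ h1] at h
    have hmem : l.getD i 0 ∈ PySem.Set.ofList l := by
      rw [PySem.Set.mem_ofList, List.getD_eq_getElem _ _ hi]
      exact List.getElem_mem hi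
    rw [h, if_pos hmem]
    simp [tval]

-- ===== VERDICT (by name: the statement is the Claim_ definition above) =====
theorem mapping_instructions_spec : Claim_equal_mapping_instructions := by
  intro instructions local_offset _
  unfold Spec_mapping_instructions
  rw [a_eq, bAlt_eq]
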